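-- pv_equiv track=rewrite | github.com/dwest77a/elastic_scrapers | scraper_code/org_scraper.py | rmWhiteSpace
-- ===== SOURCE A (Python) =====
-- def rmWhiteSpace(word):
--     isword = False
--     new_word = ''
--     for char in word:
--         if isword and char != '\n':
--             new_word += char
--         elif char != ' ' and char != '\t':
--             isword = True
--             new_word += char
--         else:
--             pass
--     return new_word
-- ===== SOURCE B (Python) =====
-- def rmWhiteSpace(word):
--     return word.lstrip(' \t')
-- ===== Notes on version B (the rewrite author's own statement) =====
-- stated objective: idiomatic
-- what changed: Replaced the character-by-character loop with a state flag and repeated string concatenation by a single str.lstrip call restricted to space and tab, since A only drops leading spaces/tabs and keeps everything after the first other character verbatim (newlines included).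
import Mathlib
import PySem

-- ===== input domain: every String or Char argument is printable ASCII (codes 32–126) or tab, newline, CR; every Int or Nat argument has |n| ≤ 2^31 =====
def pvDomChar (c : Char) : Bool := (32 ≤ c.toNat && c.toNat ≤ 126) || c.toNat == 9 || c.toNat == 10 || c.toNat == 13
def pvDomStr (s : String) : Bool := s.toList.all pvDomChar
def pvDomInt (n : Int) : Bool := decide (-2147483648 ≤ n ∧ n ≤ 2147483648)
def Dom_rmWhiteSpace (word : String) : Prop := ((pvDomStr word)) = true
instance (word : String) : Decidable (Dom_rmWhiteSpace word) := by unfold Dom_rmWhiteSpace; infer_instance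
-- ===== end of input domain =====

-- B replaces A's flag-and-accumulate loop with the idiomatic word.lstrip(' \t'); return values proved equal on Dom.

-- ===== PORT A =====
-- the for-loop over the characters of word, state (isword, new_word)
def rmWhiteSpaceLoop (isword : Bool) (new_word : String) : List Char → String
  | [] => new_word
  | c :: rest =>
    if isword && c ≠ '\n' then rmWhiteSpaceLoop isword (new_word.push c) rest
    else if c ≠ ' ' && c ≠ '\t' then rmWhiteSpaceLoop true (new_word.push c) rest
    else rmWhiteSpaceLoop isword new_word rest

def rmWhiteSpace (word : String) : String := rmWhiteSpaceLoop false "" word.toList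

-- ===== PORT B =====
-- word.lstrip(' \t'): drop leading chars from {' ','\t'}, keep the rest verbatim (exact port of str.lstrip with that char set)
def rmWhiteSpace_alt (word : String) : String :=
  String.ofList (word.toList.dropWhile (fun c => c == ' ' || c == '\t'))

-- ===== PRECONDITION & SPEC =====
def Spec_rmWhiteSpace (word : String) (out : String) : Prop := out = rmWhiteSpace_alt word
instance (word : String) (out : String) : Decidable (Spec_rmWhiteSpace word out) := by unfold Spec_rmWhiteSpace; infer_instance

-- ===== CLAIM (what is proved, stated in full; the proofs are below) =====
def Claim_equal_rmWhiteSpace : Prop := ∀ (word : String), Dom_rmWhiteSpace word → Spec_rmWhiteSpace word (rmWhiteSpace word)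

-- ===== LEMMAS AND PROOFS =====

-- once isword is set, every remaining character is appended (a '\n' goes through the elif branch)
theorem rmWhiteSpaceLoop_true (l : List Char) (acc : String) :
    (rmWhiteSpaceLoop true acc l).toList = acc.toList ++ l := by
  induction l generalizing acc with
  | nil => simp [rmWhiteSpaceLoop]
  | cons c rest ih =>
    by_cases h : c = '\n'
    · subst h; simp [rmWhiteSpaceLoop, ih]
    · simp [rmWhiteSpaceLoop, h, ih]

theorem rmWhiteSpaceLoop_false (l : List Char) (acc : String) :
    (rmWhiteSpaceLoop false acc l).toList
      = acc.toList ++ l.dropWhile (fun c => c == ' ' || c == '\t') := by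
  induction l generalizing acc with
  | nil => simp [rmWhiteSpaceLoop]
  | cons c rest ih =>
    by_cases h : c = ' ' ∨ c = '\t'
    · rcases h with h | h <;> simp [rmWhiteSpaceLoop, h, List.dropWhile, ih]
    · push_neg at h
      obtain ⟨h1, h2⟩ := h
      have : (c == ' ' || c == '\t') = false := by simp [h1, h2]
      simp [rmWhiteSpaceLoop, h1, h2, List.dropWhile, this, rmWhiteSpaceLoop_true]

-- ===== VERDICT (by name: the statement is the Claim_ definition above) =====
theorem rmWhiteSpace_spec : Claim_equal_rmWhiteSpace := by
  intro word _
  unfold Spec_rmWhiteSpace rmWhiteSpace rmWhiteSpace_alt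
  apply String.toList_inj.mp
  rw [rmWhiteSpaceLoop_false]
  simp
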